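-- pv_equiv track=rewrite | github.com/right21/plugin.video.torrenterIL | util.py | getRealNames
-- ===== SOURCE A (Python) =====
-- def isThatSxxExx (string):
-- 	if (len(string) != 6):
-- 		return False
-- 	else:
-- 		if (string[0].isdigit() == True):
-- 			return False
-- 		elif (string[1].isdigit() == False):
-- 			return False
-- 		elif(string[2].isdigit() == False):
-- 			return False
-- 		elif (string[3].isdigit() == True):
-- 			return False
-- 		elif (string[4].isdigit() == False):
-- 			return False
-- 		elif (string[5].isdigit() == False):
-- 			return False
-- 		else:
-- 			return True
--
-- def getRealNames (title):
-- 	change = True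
-- 	strDummy = title
-- 	strDummy = title.replace(".", " ")
-- 	returnedTitle = ''
-- 	listString = strDummy.split()
-- 	ShowName = ''
-- 	SxxExx = ''
-- 	for i in listString:
-- 		if (change == True):
-- 			if (isThatSxxExx(i) == True):
-- 				change = False
-- 				ShowName = returnedTitle
-- 				SxxExx = i
-- 			returnedTitle = returnedTitle + i + ' '
--
-- 	names = [ShowName, SxxExx, returnedTitle]
-- 	return names
-- ===== SOURCE B (Python) =====
-- def isThatSxxExx(s):
--     return len(s) == 6 and ''.join('1' if c.isdigit() else '0' for c in s) == '011011'
--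
-- def _go(tokens):
--     # returns (show, sxxexx, joined) for this suffix, assembled back-to-front
--     if not tokens:
--         return ('', '', '')
--     t = tokens[0]
--     if isThatSxxExx(t):
--         return ('', t, t + ' ')
--     show, sxx, joined = _go(tokens[1:])
--     if sxx:
--         return (t + ' ' + show, sxx, t + ' ' + joined)
--     return ('', '', t + ' ' + joined)
--
-- def getRealNames(title):
--     show, sxx, joined = _go(title.replace('.', ' ').split())
--     return [show, sxx, joined]
-- ===== Notes on version B (the rewrite author's own statement) =====
-- stated objective: alternative
-- what changed: Replaces A's forward flag-loop (a 'change' boolean plus three string accumulators mutated while scanning) with a structural recursion over the token list that detects the marker on descent and assembles all three result strings back-to-front by prepending on return; the marker test becomes a digit-mask string comparison instead of a six-branch if chain.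
import Mathlib
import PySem

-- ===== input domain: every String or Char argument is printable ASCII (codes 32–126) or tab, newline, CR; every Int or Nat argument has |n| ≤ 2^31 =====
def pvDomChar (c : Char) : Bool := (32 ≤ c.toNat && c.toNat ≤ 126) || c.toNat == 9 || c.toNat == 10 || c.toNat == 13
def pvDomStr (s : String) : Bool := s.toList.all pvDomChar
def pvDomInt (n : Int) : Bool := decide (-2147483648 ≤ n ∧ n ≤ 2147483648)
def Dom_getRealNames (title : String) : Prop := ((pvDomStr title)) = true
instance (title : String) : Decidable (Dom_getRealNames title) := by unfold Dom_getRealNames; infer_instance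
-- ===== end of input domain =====

-- B replaces A's forward flag-loop with structural recursion that assembles the strings by prepending on return (objective: alternative decomposition).

-- ===== PORT A =====
-- string[k].isdigit() with k in range (len == 6 already checked): PySem.List.pyGetD, exact here.
def isThatSxxExxA (s : List Char) : Bool :=
  if s.length ≠ 6 then false
  else if PySem.Chars.isdigit (PySem.List.pyGetD s 0 ' ') = true then false
  else if PySem.Chars.isdigit (PySem.List.pyGetD s 1 ' ') = false then false
  else if PySem.Chars.isdigit (PySem.List.pyGetD s 2 ' ') = false then false
  else if PySem.Chars.isdigit (PySem.List.pyGetD s 3 ' ') = true then false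
  else if PySem.Chars.isdigit (PySem.List.pyGetD s 4 ' ') = false then false
  else if PySem.Chars.isdigit (PySem.List.pyGetD s 5 ' ') = false then false
  else true

-- A's loop body; state = (change, returnedTitle, ShowName, SxxExx), strings as List Char (exact)
def stepA (st : Bool × List Char × List Char × List Char) (i : List Char) :
    Bool × List Char × List Char × List Char :=
  let (change, returnedTitle, ShowName, SxxExx) := st
  if change = true then
    if isThatSxxExxA i = true then
      (false, returnedTitle ++ i ++ [' '], returnedTitle, i)
    else
      (true, returnedTitle ++ i ++ [' '], ShowName, SxxExx)
  else st

def getRealNames (title : String) : List String :=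
  let strDummy := PySem.Str.replace title "." " "
  let listString := (PySem.Str.split₀ strDummy).map String.toList
  let st := listString.foldl stepA (true, [], [], [])
  [String.ofList st.2.2.1, String.ofList st.2.2.2, String.ofList st.2.1]

-- ===== PORT B =====
-- ''.join('1' if c.isdigit() else '0' for c in s) == '011011' with the length check (exact)
def isThatSxxExxB (s : List Char) : Bool :=
  s.length == 6 && s.map (fun c => if PySem.Chars.isdigit c then '1' else '0')
      == ['0', '1', '1', '0', '1', '1']

-- _go: structural recursion on the token list; result for the suffix, strings prepended on return
def goB : List (List Char) → List Char × List Char × List Char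
  | [] => ([], [], [])
  | t :: ts =>
      if isThatSxxExxB t then ([], t, t ++ [' '])
      else
        let s := goB ts
        if s.2.1 ≠ [] then (t ++ [' '] ++ s.1, s.2.1, t ++ [' '] ++ s.2.2)
        else ([], [], t ++ [' '] ++ s.2.2)

def getRealNames_alt (title : String) : List String :=
  let tokens := (PySem.Str.split₀ (PySem.Str.replace title "." " ")).map String.toList
  let s := goB tokens
  [String.ofList s.1, String.ofList s.2.1, String.ofList s.2.2]

-- ===== PRECONDITION & SPEC =====
def Spec_getRealNames (title : String) (out : List String) : Prop := out = getRealNames_alt title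
instance (title : String) (out : List String) : Decidable (Spec_getRealNames title out) := by unfold Spec_getRealNames; infer_instance

-- ===== CLAIM (what is proved, stated in full; the proofs are below) =====
def Claim_equal_getRealNames : Prop := ∀ (title : String), Dom_getRealNames title → Spec_getRealNames title (getRealNames title)

-- ===== LEMMAS AND PROOFS =====

theorem helper_eq (s : List Char) : isThatSxxExxA s = isThatSxxExxB s := by
  rcases s with _ | ⟨c0, _ | ⟨c1, _ | ⟨c2, _ | ⟨c3, _ | ⟨c4, _ | ⟨c5, _ | ⟨c6, r⟩⟩⟩⟩⟩⟩⟩ <;>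
    simp [isThatSxxExxA, isThatSxxExxB, PySem.List.pyGetD] ;
    by_cases h0 : PySem.Chars.isdigit c0 <;>
    by_cases h1 : PySem.Chars.isdigit c1 <;>
    by_cases h2 : PySem.Chars.isdigit c2 <;>
    by_cases h3 : PySem.Chars.isdigit c3 <;>
    by_cases h4 : PySem.Chars.isdigit c4 <;>
    by_cases h5 : PySem.Chars.isdigit c5 <;>
    simp [h0, h1, h2, h3, h4, h5]

theorem marker_ne_nil {t : List Char} (h : isThatSxxExxB t = true) : t ≠ [] := by
  intro he; subst he; simp [isThatSxxExxB] at h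

theorem foldl_false (ts : List (List Char)) (r sn sx : List Char) :
    ts.foldl stepA (false, r, sn, sx) = (false, r, sn, sx) := by
  induction ts with
  | nil => rfl
  | cons t ts ih => simpa [stepA] using ih

-- the accumulator-passing reduct of A's loop, related below to B's prepend-on-return recursion
theorem foldl_goB (ts : List (List Char)) (acc : List Char) :
    [String.ofList (ts.foldl stepA (true, acc, [], [])).2.2.1,
     String.ofList (ts.foldl stepA (true, acc, [], [])).2.2.2,
     String.ofList (ts.foldl stepA (true, acc, [], [])).2.1] =
      if (goB ts).2.1 ≠ [] then
        [String.ofList (acc ++ (goB ts).1), String.ofList (goB ts).2.1,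
         String.ofList (acc ++ (goB ts).2.2)]
      else
        ["", "", String.ofList (acc ++ (goB ts).2.2)] := by
  induction ts generalizing acc with
  | nil => simp [goB]
  | cons t ts ih =>
    rw [List.foldl_cons]
    by_cases h : isThatSxxExxB t = true
    · have hne := marker_ne_nil h
      simp [stepA, helper_eq, h, goB, foldl_false, hne]
    · have hA : isThatSxxExxA t ≠ true := by rw [helper_eq]; simpa using h
      have hs : stepA (true, acc, [], []) t = (true, acc ++ t ++ [' '], [], []) := by
        simp [stepA, hA]
      rw [hs, ih (acc ++ t ++ [' '])]
      by_cases hr : (goB ts).2.1 = []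
      · simp [goB, h, hr]
      · simp [goB, h, hr]

theorem goB_show_nil {ts : List (List Char)} (h : (goB ts).2.1 = []) : (goB ts).1 = [] := by
  induction ts with
  | nil => rfl
  | cons t ts ih =>
    by_cases hm : isThatSxxExxB t = true
    · exact absurd h (by simp [goB, hm, marker_ne_nil hm])
    · by_cases hr : (goB ts).2.1 = []
      · simp [goB, hm, hr]
      · exact absurd h (by simp [goB, hm, hr])

-- ===== VERDICT (by name: the statement is the Claim_ definition above) =====
theorem getRealNames_spec : Claim_equal_getRealNames := by
  intro title _
  show getRealNames title = getRealNames_alt title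
  unfold getRealNames getRealNames_alt
  dsimp only
  generalize (PySem.Str.split₀ (PySem.Str.replace title "." " ")).map String.toList = ts
  rw [foldl_goB ts []]
  by_cases hr : (goB ts).2.1 = []
  · simp [hr, goB_show_nil hr]
  · simp [hr]
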